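-- pv_equiv track=rewrite | github.com/bhyun/daily-algorithm | 2022/2022.02/Programmers_징검다리 건너기.py | enable_to_cross
-- ===== SOURCE A (Python) =====
-- def enable_to_cross(stones, k):
--     cnt = 0
--     for stone in stones:
--         if stone < 0:
--             cnt += 1
--             if cnt >= k:
--                 return False
--         else:
--             cnt = 0
--     return True
-- ===== SOURCE B (Python) =====
-- def enable_to_cross(stones, k):
--     # Split the sequence into maximal runs of same-sign stones (by the key
--     # "stone < 0") and reject iff some negative run has length >= k.
--     i, n = 0, len(stones)
--     while i < n:
--         neg = stones[i] < 0
--         j = i + 1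
--         while j < n and (stones[j] < 0) == neg:
--             j += 1
--         if neg and j - i >= k:
--             return False
--         i = j
--     return True
-- ===== Notes on version B (the rewrite author's own statement) =====
-- stated objective: alternative
-- what changed: Replaces the reset-counter single pass with a group-by decomposition: the list is split into maximal runs keyed by (stone < 0) and the answer is whether no negative-keyed run has length >= k.
import Mathlib
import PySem

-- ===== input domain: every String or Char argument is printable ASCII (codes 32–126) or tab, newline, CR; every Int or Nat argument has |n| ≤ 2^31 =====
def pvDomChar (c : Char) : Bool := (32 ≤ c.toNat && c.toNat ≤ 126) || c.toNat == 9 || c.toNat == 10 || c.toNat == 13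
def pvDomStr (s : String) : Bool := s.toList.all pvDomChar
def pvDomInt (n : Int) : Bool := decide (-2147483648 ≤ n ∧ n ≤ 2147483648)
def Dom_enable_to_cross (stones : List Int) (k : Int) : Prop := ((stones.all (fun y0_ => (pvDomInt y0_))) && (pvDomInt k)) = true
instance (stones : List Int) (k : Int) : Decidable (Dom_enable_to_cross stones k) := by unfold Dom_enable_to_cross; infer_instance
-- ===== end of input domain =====

-- B replaces A's reset-counter single pass by a maximal-run (group-by) decomposition; alternative, same O(n) cost.


-- ===== PORT A =====
-- the for-loop with its running counter `cnt` and early `return False`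
def enable_to_cross_loop (stones : List Int) (cnt : Int) (k : Int) : Bool :=
  match stones with
  | [] => true
  | s :: rest =>
    if s < 0 then
      if cnt + 1 ≥ k then false
      else enable_to_cross_loop rest (cnt + 1) k
    else enable_to_cross_loop rest 0 k

def enable_to_cross (stones : List Int) (k : Int) : Bool :=
  enable_to_cross_loop stones 0 k


-- ===== PORT B =====
-- split into maximal runs keyed by (stone < 0): list of (key, run length);
-- the inner `while j` scan of Source B is the takeWhile/dropWhile split on the key
def enable_to_cross_runs (stones : List Int) : List (Bool × Nat) :=
  match stones with
  | [] => []
  | x :: t =>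
    let b := decide (x < 0)
    (b, (t.takeWhile (fun y => decide (y < 0) == b)).length + 1) ::
      enable_to_cross_runs (t.dropWhile (fun y => decide (y < 0) == b))
termination_by stones.length
decreasing_by
  have := List.length_dropWhile_le (fun y => decide (y < 0) == b) t
  simp; omega

def enable_to_cross_alt (stones : List Int) (k : Int) : Bool :=
  (enable_to_cross_runs stones).all (fun p => !(p.1 && decide ((p.2 : Int) ≥ k)))

-- ===== PRECONDITION & SPEC =====
def Spec_enable_to_cross (stones : List Int) (k : Int) (out : Bool) : Prop := out = enable_to_cross_alt stones k
instance (stones : List Int) (k : Int) (out : Bool) : Decidable (Spec_enable_to_cross stones k out) := by unfold Spec_enable_to_cross; infer_instance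

-- ===== CLAIM (what is proved, stated in full; the proofs are below) =====
def Claim_equal_enable_to_cross : Prop := ∀ (stones : List Int) (k : Int), Dom_enable_to_cross stones k → Spec_enable_to_cross stones k (enable_to_cross stones k)

-- ===== LEMMAS AND PROOFS =====

-- one-step unfolding of the loop (used by the proofs below)
lemma enable_to_cross_loop_cons (s : Int) (rest : List Int) (cnt k : Int) :
    enable_to_cross_loop (s :: rest) cnt k =
      if s < 0 then
        if cnt + 1 ≥ k then false else enable_to_cross_loop rest (cnt + 1) k
      else enable_to_cross_loop rest 0 k := rfl

-- a nonempty run of negatives: the loop returns false iff the run pushes the counter to ≥ k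
lemma loop_negrun (k : Int) : ∀ (ys : List Int) (y : Int) (rest : List Int),
    (∀ z ∈ y :: ys, z < 0) → ∀ cnt : Int,
    enable_to_cross_loop ((y :: ys) ++ rest) cnt k =
      if cnt + (ys.length + 1) ≥ k then false
      else enable_to_cross_loop rest (cnt + (ys.length + 1)) k := by
  intro ys
  induction ys with
  | nil =>
    intro y rest h cnt
    have hy : y < 0 := h y (by simp)
    simp [enable_to_cross_loop, if_pos hy]
  | cons z zs ih =>
    intro y rest h cnt
    have hy : y < 0 := h y (by simp)
    have h' : ∀ w ∈ z :: zs, w < 0 := fun w hw => h w (by simp at hw ⊢; tauto)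
    rw [List.cons_append, enable_to_cross_loop_cons, if_pos hy, ih z rest h' (cnt + 1)]
    have hlen : (0 : Int) ≤ zs.length := by positivity
    simp only [List.length_cons]
    push_cast
    split_ifs <;> first | rfl | omega | (congr 1; ring)

-- a nonempty run of nonnegatives resets the counter to 0
lemma loop_nonnegrun (ys rest : List Int) (k : Int) (h : ∀ y ∈ ys, ¬ y < 0) (hne : ys ≠ []) :
    ∀ cnt : Int, enable_to_cross_loop (ys ++ rest) cnt k = enable_to_cross_loop rest 0 k := by
  induction ys with
  | nil => exact absurd rfl hne
  | cons y ys ih =>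
    intro cnt
    have hy : ¬ y < 0 := h y (by simp)
    have h' : ∀ z ∈ ys, ¬ z < 0 := fun z hz => h z (by simp [hz])
    rw [List.cons_append, enable_to_cross_loop_cons, if_neg hy]
    cases ys with
    | nil => simp
    | cons z zs => exact ih h' (by simp) 0

-- the starting counter is irrelevant when the list is empty or starts nonnegative
lemma loop_start_irrel (zs : List Int) (k cnt : Int)
    (h : ∀ z, zs.head? = some z → ¬ z < 0) :
    enable_to_cross_loop zs cnt k = enable_to_cross_loop zs 0 k := by
  cases zs with
  | nil => rfl
  | cons z zs =>
    have hz : ¬ z < 0 := h z rfl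
    simp [enable_to_cross_loop, if_neg hz]

lemma head_dropWhile_false {α : Type} (p : α → Bool) (t : List α) :
    ∀ z, (t.dropWhile p).head? = some z → p z = false := by
  induction t with
  | nil => intro z hz; simp at hz
  | cons y ys ih =>
    intro z hz
    by_cases hy : p y
    · rw [List.dropWhile_cons_of_pos hy] at hz; exact ih z hz
    · rw [List.dropWhile_cons_of_neg hy] at hz
      simp at hz; subst hz; simpa using hy

lemma loop_eq_runs (k : Int) : ∀ (n : Nat) (xs : List Int), xs.length ≤ n →
    enable_to_cross_loop xs 0 k = enable_to_cross_alt xs k := by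
  intro n
  induction n with
  | zero =>
    intro xs hlen
    have : xs = [] := by cases xs <;> simp_all
    subst this
    simp [enable_to_cross_loop, enable_to_cross_alt, enable_to_cross_runs]
  | succ n ih =>
    intro xs hlen
    cases xs with
    | nil => simp [enable_to_cross_loop, enable_to_cross_alt, enable_to_cross_runs]
    | cons x t =>
      set b := decide (x < 0) with hb
      set p : Int → Bool := fun y => decide (y < 0) == b with hp
      set ys := t.takeWhile p with hys
      set zs := t.dropWhile p with hzs
      have hsplit : t = ys ++ zs := (List.takeWhile_append_dropWhile).symm
      have hzslen : zs.length ≤ n := by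
        have h1 := List.length_dropWhile_le p t
        rw [← hzs] at h1
        simp at hlen; omega
      have hzs_head : ∀ z, zs.head? = some z → p z = false :=
        head_dropWhile_false p t
      have ihz : enable_to_cross_loop zs 0 k = enable_to_cross_alt zs k := ih zs hzslen
      have hruns : enable_to_cross_runs (x :: t) =
          (b, ys.length + 1) :: enable_to_cross_runs zs := by
        rw [enable_to_cross_runs]
      by_cases hx : x < 0
      · -- negative run x :: ys
        have hb' : b = true := by simp [hb, hx]
        have hys_neg : ∀ y ∈ ys, y < 0 := by
          intro y hy
          have := List.mem_takeWhile_imp (hys ▸ hy)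
          simp [hp, hb', decide_eq_true_eq] at this; exact this
        have hzs_nonneg : ∀ z, zs.head? = some z → ¬ z < 0 := by
          intro z hz
          have := hzs_head z hz
          simp [hp, hb'] at this; omega
        have hall : ∀ y ∈ (x :: ys), y < 0 := by
          intro y hy; rcases List.mem_cons.mp hy with h | h
          · subst h; exact hx
          · exact hys_neg y h
        calc enable_to_cross_loop (x :: t) 0 k
            = enable_to_cross_loop ((x :: ys) ++ zs) 0 k := by rw [hsplit]; rfl
          _ = if (0 : Int) + ((ys.length : Int) + 1) ≥ k then false
              else enable_to_cross_loop zs ((0 : Int) + ((ys.length : Int) + 1)) k :=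
              loop_negrun k ys x zs hall 0
          _ = enable_to_cross_alt (x :: t) k := by
              rw [loop_start_irrel zs k _ hzs_nonneg, ihz]
              simp only [enable_to_cross_alt, hruns, List.all_cons, hb']
              by_cases hk : ((ys.length : Int) + 1 ≥ k)
              · rw [if_pos (by omega)]
                simp only [Bool.true_and]
                rw [decide_eq_true (by push_cast; omega)]
                simp
              · rw [if_neg (by omega)]
                simp only [Bool.true_and]
                rw [decide_eq_false (by push_cast; omega)]
                simp
      · -- nonnegative run x :: ys
        have hb' : b = false := by simp [hb, hx]
        have hys_nonneg : ∀ y ∈ (x :: ys), ¬ y < 0 := by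
          intro y hy; rcases List.mem_cons.mp hy with h | h
          · subst h; exact hx
          · have := List.mem_takeWhile_imp (hys ▸ h)
            simp [hp, hb'] at this; omega
        calc enable_to_cross_loop (x :: t) 0 k
            = enable_to_cross_loop ((x :: ys) ++ zs) 0 k := by rw [hsplit]; rfl
          _ = enable_to_cross_loop zs 0 k :=
              loop_nonnegrun (x :: ys) zs k hys_nonneg (by simp) 0
          _ = enable_to_cross_alt (x :: t) k := by
              rw [ihz]
              simp [enable_to_cross_alt, hruns, hb']

-- ===== VERDICT (by name: the statement is the Claim_ definition above) =====
theorem enable_to_cross_spec : Claim_equal_enable_to_cross := by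
  intro stones k _
  unfold Spec_enable_to_cross enable_to_cross
  exact loop_eq_runs k stones.length stones le_rfl
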